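-- pv_equiv track=rewrite | github.com/Edgarelcrack/proyecto-1-ADA2 | EPDLSP_dinamica.py | subasta
-- ===== SOURCE A (Python) =====
-- def subasta(A, B, ofertas):
--     n = len(ofertas)
--     dp = [[0] * (A + 1) for _ in range(n + 1)]
--     asignaciones = [[0] * (A + 1) for _ in range(n + 1)]
--
--     for i in range(1, n + 1):
--         pi, mi, Mi = ofertas[i - 1]
--         for a in range(A + 1):
--             dp[i][a] = dp[i - 1][a]
--             for x in range(mi, min(Mi, a) + 1):
--                 valor_actual = dp[i - 1][a - x] + x * pi
--                 if valor_actual > dp[i][a]: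
--                     dp[i][a] = valor_actual
--                     asignaciones[i][a] = x
--
--     mejor_valor = dp[n][A]
--     acciones_asignadas = [0] * n
--     a = A
--
--     for i in range(n, 0, -1):
--         acciones_asignadas[i - 1] = asignaciones[i][a]
--         a -= asignaciones[i][a]
--
--     return acciones_asignadas, mejor_valor
-- ===== SOURCE B (Python) =====
-- def subasta(A, B, ofertas):
--     # Sliding-window-maximum reformulation: dp[a] = max(prev[a], a*pi + max_{j in window} (prev[j] - j*pi)),
--     # window j in [max(a-Mi,0), a-mi]; a monotonic queue gives each row in O(A) queue operations
--     # instead of A's O(A*M) inner scans.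
--     n = len(ofertas)
--     prev = [0] * (A + 1)
--     asg_rows = []
--     for (pi, mi, Mi) in ofertas:
--         if Mi < mi:
--             # infeasible bid: no admissible amount, row unchanged
--             asg_rows.append([0] * (A + 1))
--             continue
--         cur = [0] * (A + 1)
--         arow = [0] * (A + 1)
--         q = []   # monotonic queue of (j, prev[j] - j*pi), keys strictly decreasing
--         for a in range(A + 1):
--             hi = a - mi
--             if hi >= 0:
--                 k = prev[hi] - hi * pi
--                 while q and q[-1][1] <= k:
--                     q.pop()
--                 q.append((hi, k))
--             while q and q[0][0] < a - Mi:
--                 q.pop(0)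
--             best = prev[a]
--             if q:
--                 v = a * pi + q[0][1]
--                 if v > best:
--                     best = v
--                     arow[a] = a - q[0][0]
--             cur[a] = best
--         prev = cur
--         asg_rows.append(arow)
--     acciones = [0] * n
--     a = A
--     for i in range(n - 1, -1, -1):
--         x = asg_rows[i][a]
--         acciones[i] = x
--         a -= x
--     return acciones, prev[A]
-- ===== Notes on version B (the rewrite author's own statement) =====
-- stated objective: faster
-- what changed: Replaced A's O(n*A*M) triple loop (for each bidder and budget a, scanning every admissible amount x) by the linear reformulation dp[j]-pi*j with a monotonic-queue sliding-window maximum per row, giving each dp row in O(A).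
import Mathlib
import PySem

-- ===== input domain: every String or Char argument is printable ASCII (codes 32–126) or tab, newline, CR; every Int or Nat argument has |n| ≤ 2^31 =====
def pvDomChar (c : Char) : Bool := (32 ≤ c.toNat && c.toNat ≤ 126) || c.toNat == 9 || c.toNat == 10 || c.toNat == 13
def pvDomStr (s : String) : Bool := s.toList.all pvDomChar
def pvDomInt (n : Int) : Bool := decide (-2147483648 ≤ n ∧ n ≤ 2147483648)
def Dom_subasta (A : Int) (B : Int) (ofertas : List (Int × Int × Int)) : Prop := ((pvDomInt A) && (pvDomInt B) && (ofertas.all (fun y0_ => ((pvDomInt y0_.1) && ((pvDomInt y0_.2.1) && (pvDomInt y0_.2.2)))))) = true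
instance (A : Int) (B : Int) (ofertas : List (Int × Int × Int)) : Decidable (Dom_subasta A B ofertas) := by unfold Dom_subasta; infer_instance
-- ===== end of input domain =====

-- B replaces A's O(n·A·M) triple loop by the linear reformulation dp[j]-pi*j with a
-- monotonic-queue sliding-window maximum, O(n·A); return values agree on Pre_subasta.

-- ===== PORT A =====
-- inner 'for x in range(mi, min(Mi, a) + 1)' loop of A; Python's O(1) indexing dp[i-1][a-x]
-- is realized by walking rev = reversed prev[:a-mi+1] in step with x (same values, same order)
def subastaInnerA (pi : Int) (pa : Int) (xs : List Int) (rev : List Int) : Int × Int :=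
  (xs.zip rev).foldl
    (fun ds xp =>
      let v := xp.2 + xp.1 * pi
      if ds.1 < v then (v, xp.1) else ds)
    (pa, 0)

-- 'for a in range(A + 1)' loop of A, building row i of dp and asignaciones.
-- Python indexes dp[i-1][a] and dp[i-1][a-x] in O(1); here aRest = prev[a:], hiRest = prev[a-mi:]
-- and revTo = reversed prev[:a-mi+1] are cursors advanced by one per iteration.
-- Rows are accumulated in reverse and flipped once at the end.
def subastaRowA (A pi mi Mi : Int) (prev : List Int) : List Int × List Int :=
  let st := (PySem.List.pyRange 0 (A + 1) 1).foldl
    (fun (st : List Int × List Int × List Int × List Int × List Int) a =>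
      let aRest := st.1
      let hiRest := st.2.1
      let revTo := st.2.2.1
      let revTo' := if 0 ≤ a - mi then hiRest.headD 0 :: revTo else revTo
      let hiRest' := if 0 ≤ a - mi then hiRest.tail else hiRest
      let ds := subastaInnerA pi (aRest.headD 0) (PySem.List.pyRange mi (min Mi a + 1) 1) revTo'
      (aRest.tail, hiRest', revTo', ds.1 :: st.2.2.2.1, ds.2 :: st.2.2.2.2))
    (prev, prev, [], [], [])
  (st.2.2.2.1.reverse, st.2.2.2.2.reverse)

def subasta (A : Int) (B : Int) (ofertas : List (Int × Int × Int)) : List Int × Int :=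
  let st := ofertas.foldl
    (fun (st : List Int × List (List Int)) of =>
      let r := subastaRowA A of.1 of.2.1 of.2.2 st.1
      (r.1, st.2 ++ [r.2]))
    (List.replicate (A + 1).toNat 0, [])
  let bk := st.2.foldr
    (fun arow (bk : Int × List Int) =>
      let x := PySem.List.pyGetD arow bk.1 0
      (bk.1 - x, x :: bk.2))
    (A, [])
  (bk.2, PySem.List.pyGetD st.1 A 0)

-- ===== PORT B =====
-- 'while q and q[-1][1] <= k: q.pop()' of Source B
def popBackB (k : Int) (q : List (Int × Int)) : List (Int × Int) :=
  match hl : q.getLast? with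
  | some p =>
    if p.2 ≤ k then popBackB k q.dropLast else q
  | none => q
termination_by q.length
decreasing_by
  have hne : q ≠ [] := by intro h; subst h; simp at hl
  have := List.length_pos_of_ne_nil hne
  simp [List.length_dropLast]; omega

-- 'for a in range(A + 1)' loop of Source B: monotonic queue q of (j, prev[j] - j*pi).
-- Python indexes prev[hi] and prev[a] in O(1); here hiRest = prev[a-mi:] and aRest = prev[a:]
-- are cursors advanced by one per iteration; 'while q and q[0][0] < a - Mi: q.pop(0)' is a
-- dropWhile from the front; cur and arow are accumulated in reverse and flipped at the end.
def subastaRowB (A pi mi Mi : Int) (prev : List Int) : List Int × List Int :=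
  let st := (PySem.List.pyRange 0 (A + 1) 1).foldl
    (fun (st : List (Int × Int) × List Int × List Int × List Int × List Int) a =>
      let q := st.1
      let aRest := st.2.1
      let hiRest := st.2.2.1
      let q1 :=
        if 0 ≤ a - mi then
          let k := hiRest.headD 0 - (a - mi) * pi
          popBackB k q ++ [(a - mi, k)]
        else q
      let hiRest' := if 0 ≤ a - mi then hiRest.tail else hiRest
      let q2 := q1.dropWhile (fun p => decide (p.1 < a - Mi))
      let pa := aRest.headD 0
      match q2.head? with
      | some p =>
        let v := a * pi + p.2
        if pa < v then (q2, aRest.tail, hiRest', v :: st.2.2.2.1, (a - p.1) :: st.2.2.2.2)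
        else (q2, aRest.tail, hiRest', pa :: st.2.2.2.1, (0 : Int) :: st.2.2.2.2)
      | none => (q2, aRest.tail, hiRest', pa :: st.2.2.2.1, (0 : Int) :: st.2.2.2.2))
    ([], prev, prev, [], [])
  (st.2.2.2.1.reverse, st.2.2.2.2.reverse)

def subasta_alt (A : Int) (B : Int) (ofertas : List (Int × Int × Int)) : List Int × Int :=
  let st := ofertas.foldl
    (fun (st : List Int × List (List Int)) of =>
      if of.2.2 < of.2.1 then
        (st.1, st.2 ++ [List.replicate (A + 1).toNat 0])
      else
        let r := subastaRowB A of.1 of.2.1 of.2.2 st.1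
        (r.1, st.2 ++ [r.2]))
    (List.replicate (A + 1).toNat 0, [])
  let bk := st.2.foldr
    (fun arow (bk : Int × List Int) =>
      let x := PySem.List.pyGetD arow bk.1 0
      (bk.1 - x, x :: bk.2))
    (A, [])
  (bk.2, PySem.List.pyGetD st.1 A 0)

-- ===== PRECONDITION & SPEC =====
-- Pre_ excludes exactly the inputs where Python A raises IndexError: negative A, or a bid with
-- mi < 0 whose range is nonempty (mi ≤ Mi), which makes A index dp[i-1][a-x] past the end.
def Pre_subasta (A : Int) (B : Int) (ofertas : List (Int × Int × Int)) : Prop :=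
  0 ≤ A ∧ ∀ o ∈ ofertas, 0 ≤ o.2.1 ∨ o.2.2 < o.2.1

instance (A : Int) (B : Int) (ofertas : List (Int × Int × Int)) : Decidable (Pre_subasta A B ofertas) := by
  unfold Pre_subasta; infer_instance

def pvWitness_subasta : Int × Int × (List (Int × Int × Int)) := (4, 0, [(3, 1, 2), (2, 0, 5), (5, 2, 2)])

def Spec_subasta (A : Int) (B : Int) (ofertas : List (Int × Int × Int)) (out : List Int × Int) : Prop := out = subasta_alt A B ofertas
instance (A : Int) (B : Int) (ofertas : List (Int × Int × Int)) (out : List Int × Int) : Decidable (Spec_subasta A B ofertas out) := by unfold Spec_subasta; infer_instance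

-- ===== CLAIM (what is proved, stated in full; the proofs are below) =====
def Claim_equal_subasta : Prop := ∀ (A : Int) (B : Int) (ofertas : List (Int × Int × Int)), Dom_subasta A B ofertas → Pre_subasta A B ofertas → Spec_subasta A B ofertas (subasta A B ofertas)

-- ===== LEMMAS AND PROOFS =====

-- the mathematical form of A's inner loop: dp[i-1][a-x] read by direct indexing
def innerSpec (pi mi Mi : Int) (prev : List Int) (a : Int) : Int × Int :=
  (PySem.List.pyRange mi (min Mi a + 1) 1).foldl
    (fun ds x =>
      let v := PySem.List.pyGetD prev (a - x) 0 + x * pi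
      if ds.1 < v then (v, x) else ds)
    (PySem.List.pyGetD prev a 0, 0)

-- general list facts used below
theorem pvHead?_dropWhile_not {α : Type} (p : α → Bool) (l : List α) (x : α)
    (h : (l.dropWhile p).head? = some x) : p x = false := by
  induction l with
  | nil => simp at h
  | cons y ys ih =>
    rw [List.dropWhile_cons] at h
    split at h
    · exact ih h
    · simp_all

theorem pvMem_dropWhile_of_not {α : Type} (p : α → Bool) (l : List α) (x : α)
    (hx : x ∈ l) (hp : p x = false) : x ∈ l.dropWhile p := by
  have hsplit := List.takeWhile_append_dropWhile (p := p) (l := l)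
  rw [← hsplit] at hx
  rcases List.mem_append.mp hx with h | h
  · have := List.mem_takeWhile_imp h; simp_all
  · exact h

theorem pvPairwise_last {α : Type} (R : α → α → Prop) (l : List α) (q : α)
    (hpw : l.Pairwise R) (hl : l.getLast? = some q) (p : α) (hp : p ∈ l) :
    p = q ∨ R p q := by
  have hne : l ≠ [] := by intro h; subst h; simp at hl
  have hq : l.getLast hne = q := by
    rw [List.getLast?_eq_getLast hne] at hl; exact Option.some_injective _ hl
  have hdec := List.dropLast_concat_getLast hne
  rw [hq] at hdec
  rw [← hdec] at hp hpw
  rcases List.mem_append.mp hp with h | h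
  · right
    exact (List.pairwise_append.mp hpw).2.2 p h q (by simp)
  · left; simpa using h

-- proof-side reformulation of the monotonic queue at the level of its live part
def qKey (pi : Int) (prev : List Int) (j : Int) : Int := PySem.List.pyGetD prev j 0 - j * pi

def stepL (pi mi Mi : Int) (prev : List Int) (l : List (Int × Int)) (a : Int) : List (Int × Int) :=
  (if 0 ≤ a - mi then
      popBackB (qKey pi prev (a - mi)) l ++ [(a - mi, qKey pi prev (a - mi))]
    else l).dropWhile (fun p => decide (p.1 < a - Mi))

def InvL (pi mi Mi : Int) (prev : List Int) (a : Int) (l : List (Int × Int)) : Prop :=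
  (∀ p ∈ l, p.2 = qKey pi prev p.1 ∧ a - Mi ≤ p.1 ∧ 0 ≤ p.1 ∧ p.1 ≤ a - mi)
  ∧ l.Pairwise (fun p q => p.1 < q.1 ∧ q.2 < p.2)
  ∧ (∀ j : Int, a - Mi ≤ j → 0 ≤ j → j ≤ a - mi →
      ∃ p ∈ l, j ≤ p.1 ∧ qKey pi prev j ≤ p.2)

theorem popBackB_prefix (k : Int) (l : List (Int × Int)) : (popBackB k l).IsPrefix l := by
  fun_induction popBackB k l with
  | case1 l p hl hle ih => exact ih.trans (List.dropLast_prefix l)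
  | case2 => exact List.prefix_refl _
  | case3 => exact List.prefix_refl _

theorem popBackB_mem_or (k : Int) (l : List (Int × Int)) (p : Int × Int) (hp : p ∈ l) :
    p ∈ popBackB k l ∨ p.2 ≤ k := by
  fun_induction popBackB k l with
  | case1 l q hl hle ih =>
    have hne : l ≠ [] := by intro h; subst h; simp at hl
    have hq : l.getLast hne = q := by
      rw [List.getLast?_eq_getLast hne] at hl; exact Option.some_injective _ hl
    have hdec := List.dropLast_concat_getLast hne
    rw [hq] at hdec
    rw [← hdec] at hp
    rcases List.mem_append.mp hp with h | h
    · exact ih h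
    · right; simp at h; subst h; exact hle
  | case2 l q hl hgt => left; exact hp
  | case3 l hl => left; exact hp

theorem popBackB_gt (k : Int) (l : List (Int × Int))
    (hpw : l.Pairwise (fun p q => p.1 < q.1 ∧ q.2 < p.2)) (p : Int × Int)
    (hp : p ∈ popBackB k l) : k < p.2 := by
  fun_induction popBackB k l with
  | case1 l q hl hle ih =>
    exact ih (hpw.sublist (List.dropLast_sublist l)) hp
  | case2 l q hl hgt =>
    rcases pvPairwise_last _ l q hpw hl p hp with h | h
    · subst h; omega
    · omega
  | case3 l hl =>
    have : l = [] := List.getLast?_eq_none_iff.mp hl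
    subst this; simp at hp

theorem pvLo_bound_dropWhile (l : List (Int × Int)) (lo : Int)
    (hpw : l.Pairwise (fun p q => p.1 < q.1 ∧ q.2 < p.2)) (p : Int × Int)
    (hp : p ∈ l.dropWhile (fun p => decide (p.1 < lo))) : lo ≤ p.1 := by
  have hpr : (l.dropWhile (fun p => decide (p.1 < lo))).Pairwise (fun p q => p.1 < q.1 ∧ q.2 < p.2) :=
    hpw.sublist (List.dropWhile_sublist _)
  cases hr : l.dropWhile (fun p => decide (p.1 < lo)) with
  | nil => rw [hr] at hp; simp at hp
  | cons p0 rest =>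
    have hhead : lo ≤ p0.1 := by
      have := pvHead?_dropWhile_not (fun p => decide (p.1 < lo)) l p0 (by rw [hr]; rfl)
      simp at this; omega
    rw [hr] at hp hpr
    rcases List.mem_cons.mp hp with h | h
    · subst h; omega
    · have := (List.rel_of_pairwise_cons hpr h).1; omega

theorem InvL_step (pi mi Mi : Int) (prev : List Int) (a : Int) (l : List (Int × Int))
    (h0 : 0 ≤ mi) (hM : mi ≤ Mi)
    (hInv : InvL pi mi Mi prev (a - 1) l) :
    InvL pi mi Mi prev a (stepL pi mi Mi prev l a) := by
  obtain ⟨hB, hP, hC⟩ := hInv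
  unfold stepL
  by_cases hpos : 0 ≤ a - mi
  · simp only [if_pos hpos]
    set k := qKey pi prev (a - mi) with hk
    set l1 : List (Int × Int) := popBackB k l ++ [(a - mi, k)] with hl1
    have hmemPB : ∀ p ∈ popBackB k l, p ∈ l := fun p hp => (popBackB_prefix k l).sublist.mem hp
    have hB1 : ∀ p ∈ l1, p.2 = qKey pi prev p.1 ∧ 0 ≤ p.1 ∧ p.1 ≤ a - mi := by
      intro p hp
      rcases List.mem_append.mp hp with h | h
      · have := hB p (hmemPB p h); refine ⟨this.1, this.2.2.1, by omega⟩
      · simp at h; subst h; exact ⟨rfl, by omega, le_refl _⟩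
    have hP1 : l1.Pairwise (fun p q => p.1 < q.1 ∧ q.2 < p.2) := by
      rw [hl1, List.pairwise_append]
      refine ⟨hP.sublist (popBackB_prefix k l).sublist, by simp, ?_⟩
      intro p hp q hq
      simp at hq; subst hq
      have hbp := hB p (hmemPB p hp)
      exact ⟨by simp; omega, by simp; exact popBackB_gt k l hP p hp⟩
    have hself : (a - mi, k) ∈ l1.dropWhile (fun p => decide (p.1 < a - Mi)) := by
      apply pvMem_dropWhile_of_not
      · exact List.mem_append.mpr (Or.inr (by simp))
      · simp; omega
    refine ⟨?_, hP1.sublist (List.dropWhile_sublist _), ?_⟩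
    · intro p hp
      have hp1 : p ∈ l1 := (List.dropWhile_sublist _).mem hp
      have := hB1 p hp1
      exact ⟨this.1, pvLo_bound_dropWhile l1 (a - Mi) hP1 p hp, this.2.1, this.2.2⟩
    · intro j hjlo hj0 hjhi
      by_cases hje : j = a - mi
      · subst hje
        exact ⟨(a - mi, k), hself, le_refl _, le_of_eq rfl⟩
      · have hjlt : j ≤ a - 1 - mi := by omega
        obtain ⟨p, hpl, hjp, hkp⟩ := hC j (by omega) hj0 hjlt
        rcases popBackB_mem_or k l p hpl with h | h
        · refine ⟨p, ?_, hjp, hkp⟩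
          apply pvMem_dropWhile_of_not
          · exact List.mem_append.mpr (Or.inl h)
          · simp; omega
        · exact ⟨(a - mi, k), hself, by omega, by omega⟩
  · simp only [if_neg hpos]
    refine ⟨?_, (hP.sublist (List.dropWhile_sublist _)), ?_⟩
    · intro p hp
      have hpl : p ∈ l := (List.dropWhile_sublist _).mem hp
      have := hB p hpl
      exact ⟨this.1, pvLo_bound_dropWhile l (a - Mi) hP p hp, this.2.2.1, by omega⟩
    · intro j hjlo hj0 hjhi
      omega

theorem foldG_const (v : Int → Int) (l : List Int) (d0 s0 : Int) (h : ∀ x ∈ l, v x ≤ d0) :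
    l.foldl (fun ds x => if ds.1 < v x then (v x, x) else ds) (d0, s0) = (d0, s0) := by
  induction l with
  | nil => rfl
  | cons x xs ih =>
    simp only [List.foldl_cons]
    rw [if_neg (by have := h x (by simp); simp; omega)]
    exact ih (fun y hy => h y (by simp [hy]))

theorem foldG_lt (v : Int → Int) (l : List Int) (M : Int) (h : ∀ x ∈ l, v x < M) :
    ∀ d0 s0 : Int, d0 < M →
      (l.foldl (fun ds x => if ds.1 < v x then (v x, x) else ds) (d0, s0)).1 < M := by
  induction l with
  | nil => intro d0 s0 hd; exact hd
  | cons x xs ih =>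
    intro d0 s0 hd
    simp only [List.foldl_cons]
    by_cases hx : d0 < v x
    · rw [if_pos hx]; exact ih (fun y hy => h y (by simp [hy])) _ _ (h x (by simp))
    · rw [if_neg hx]; exact ih (fun y hy => h y (by simp [hy])) _ _ hd

theorem innerSpec_eq (pi mi Mi : Int) (prev : List Int) (a : Int) (l : List (Int × Int))
    (h0 : 0 ≤ mi) (hM : mi ≤ Mi) (ha : 0 ≤ a)
    (hInv : InvL pi mi Mi prev a l) :
    innerSpec pi mi Mi prev a =
      (match l.head? with
       | some p =>
         if PySem.List.pyGetD prev a 0 < a * pi + p.2 then (a * pi + p.2, a - p.1)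
         else (PySem.List.pyGetD prev a 0, 0)
       | none => (PySem.List.pyGetD prev a 0, 0)) := by
  obtain ⟨hB, hP, hC⟩ := hInv
  unfold innerSpec
  by_cases hlt : a < mi
  · have hnil : l = [] := by
      rw [List.eq_nil_iff_forall_not_mem]
      intro p hp
      have := hB p hp; omega
    subst hnil
    rw [PySem.List.pyRange_one_eq_nil (by omega)]
    rfl
  · rw [not_lt] at hlt
    obtain ⟨p0, hp0l, _, _⟩ := hC (a - mi) (by omega) (by omega) (le_refl _)
    obtain ⟨q0, rest, hcons⟩ : ∃ q0 rest, l = q0 :: rest := by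
      cases l with
      | nil => simp at hp0l
      | cons q0 rest => exact ⟨q0, rest, rfl⟩
    subst hcons
    have hq0 := hB q0 (by simp)
    have hmax : ∀ j : Int, a - Mi ≤ j → 0 ≤ j → j ≤ a - mi → qKey pi prev j ≤ q0.2 := by
      intro j h1 h2 h3
      obtain ⟨p, hpl, hjp, hkp⟩ := hC j h1 h2 h3
      rcases List.mem_cons.mp hpl with h | h
      · subst h; exact hkp
      · have := (List.rel_of_pairwise_cons hP h).2; omega
    have hlater : ∀ j : Int, a - Mi ≤ j → 0 ≤ j → j ≤ a - mi → q0.1 < j → qKey pi prev j < q0.2 := by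
      intro j h1 h2 h3 h4
      obtain ⟨p, hpl, hjp, hkp⟩ := hC j h1 h2 h3
      rcases List.mem_cons.mp hpl with h | h
      · subst h; omega
      · have := (List.rel_of_pairwise_cons hP h).2; omega
    have hv : ∀ x : Int, PySem.List.pyGetD prev (a - x) 0 + x * pi = qKey pi prev (a - x) + a * pi := by
      intro x; unfold qKey; ring
    have hwin : ∀ x : Int, mi ≤ x → x ≤ min Mi a → (a - Mi ≤ a - x ∧ 0 ≤ a - x ∧ a - x ≤ a - mi) := by
      intro x h1 h2; omega
    simp only [List.head?_cons]
    by_cases hd : PySem.List.pyGetD prev a 0 < a * pi + q0.2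
    · rw [if_pos hd]
      set xstar := a - q0.1 with hxs
      have hq0win : a - Mi ≤ q0.1 ∧ 0 ≤ q0.1 ∧ q0.1 ≤ a - mi := ⟨hq0.2.1, hq0.2.2.1, hq0.2.2.2⟩
      have hxsmem1 : mi ≤ xstar := by omega
      have hxsmem2 : xstar ≤ min Mi a := by omega
      rw [PySem.List.pyRange_one_append mi xstar (min Mi a + 1) hxsmem1 (by omega),
          PySem.List.pyRange_one_cons (a := xstar) (b := min Mi a + 1) (by omega), List.foldl_append]
      have hpart1 := foldG_lt (fun x => PySem.List.pyGetD prev (a - x) 0 + x * pi)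
        (PySem.List.pyRange mi xstar 1) (a * pi + q0.2) ?_ (PySem.List.pyGetD prev a 0) 0 hd
      · set st1 := (PySem.List.pyRange mi xstar 1).foldl
          (fun ds x => if ds.1 < PySem.List.pyGetD prev (a - x) 0 + x * pi then (PySem.List.pyGetD prev (a - x) 0 + x * pi, x) else ds)
          (PySem.List.pyGetD prev a 0, 0) with hst1
        simp only [List.foldl_cons]
        have hvstar : PySem.List.pyGetD prev (a - xstar) 0 + xstar * pi = a * pi + q0.2 := by
          rw [hv]
          have : a - xstar = q0.1 := by omega
          rw [this, ← hq0.1]; ring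
        rw [hvstar, if_pos hpart1]
        rw [foldG_const _ _ _ _ ?_]
        · intro x hx
          rw [PySem.List.mem_pyRange_one] at hx
          have hw := hwin x (by omega) (by omega)
          have := hmax (a - x) hw.1 hw.2.1 hw.2.2
          simp only [hv]; omega
      · intro x hx
        rw [PySem.List.mem_pyRange_one] at hx
        have hw := hwin x hx.1 (by omega)
        have := hlater (a - x) hw.1 hw.2.1 hw.2.2 (by omega)
        simp only [hv]; omega
    · rw [if_neg hd]
      rw [foldG_const _ _ _ _ ?_]
      intro x hx
      rw [PySem.List.mem_pyRange_one] at hx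
      have hw := hwin x hx.1 (by omega)
      have := hmax (a - x) hw.1 hw.2.1 hw.2.2
      simp only [hv]; omega


-- cursor bookkeeping: the head of a drop-cursor is the indexed element
theorem pvHeadD_drop (prev : List Int) (i : Int) (h : 0 ≤ i) :
    (prev.drop i.toNat).headD 0 = PySem.List.pyGetD prev i 0 := by
  by_cases hlt : i < (prev.length : Int)
  · rw [PySem.List.pyGetD_eq_getElem prev 0 h hlt]
    have hn : i.toNat < prev.length := by omega
    rw [List.headD_eq_head?_getD, List.head?_drop, List.getElem?_eq_getElem hn]
    rfl
  · have hge : prev.length ≤ i.toNat := by omega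
    rw [List.drop_eq_nil_of_le hge]
    have : PySem.List.pyGet? prev i = none := by
      rw [PySem.List.pyGet?_eq_none_iff]
      unfold PySem.Raise.InRange
      omega
    rw [show PySem.List.pyGetD prev i 0 = (PySem.List.pyGet? prev i).getD 0 from rfl, this]
    rfl

theorem pvHeadD_drop_getElem (prev : List Int) (n : Nat) (hn : n < prev.length) :
    (prev.drop n).headD 0 = prev[n] := by
  rw [List.headD_eq_head?_getD, List.head?_drop, List.getElem?_eq_getElem hn]
  rfl

theorem pvTake_succ_reverse (prev : List Int) (n : Nat) (hn : n < prev.length) :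
    prev[n] :: (prev.take n).reverse = (prev.take (n + 1)).reverse := by
  rw [List.take_succ, List.getElem?_eq_getElem hn, Option.toList_some, List.reverse_append,
    List.reverse_singleton, List.singleton_append]

-- a fold over zip(xs, rev) equals the indexed fold when rev lists the indexed values
theorem zipFoldEq (pi : Int) (f : Int → Int) :
    ∀ (xs rev : List Int) (acc : Int × Int),
      xs.length ≤ rev.length →
      (∀ (i : Nat) (h1 : i < xs.length) (h2 : i < rev.length), rev[i] = f xs[i]) →
      (xs.zip rev).foldl
          (fun ds xp =>
            let v := xp.2 + xp.1 * pi
            if ds.1 < v then (v, xp.1) else ds) acc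
        = xs.foldl
            (fun ds x =>
              let v := f x + x * pi
              if ds.1 < v then (v, x) else ds) acc := by
  intro xs
  induction xs with
  | nil => intro rev acc _ _; rfl
  | cons x xs ih =>
    intro rev acc hlen hval
    cases rev with
    | nil => simp at hlen
    | cons r rev' =>
      have hr : r = f x := hval 0 (by simp) (by simp)
      simp only [List.zip_cons_cons, List.foldl_cons, hr]
      exact ih rev' _ (by simpa using hlen)
        (fun i h1 h2 => by
          have := hval (i + 1) (by simpa using h1) (by simpa using h2)
          simpa using this)

-- the port's zip-based inner loop computes innerSpec
theorem innerA_port_eq (pi mi Mi : Int) (prev : List Int) (a : Int)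
    (h0 : 0 ≤ mi) (hmia : 0 ≤ a - mi) (hal : a < (prev.length : Int)) :
    subastaInnerA pi (PySem.List.pyGetD prev a 0) (PySem.List.pyRange mi (min Mi a + 1) 1)
        ((prev.take ((a - mi).toNat + 1)).reverse)
      = innerSpec pi mi Mi prev a := by
  unfold subastaInnerA innerSpec
  set xs := PySem.List.pyRange mi (min Mi a + 1) 1 with hxs
  set rev := (prev.take ((a - mi).toNat + 1)).reverse with hrev
  have hm : (a - mi).toNat + 1 ≤ prev.length := by omega
  have hrevlen : rev.length = (a - mi).toNat + 1 := by
    rw [hrev, List.length_reverse, List.length_take]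
    omega
  have hxslen : xs.length = (min Mi a + 1 - mi).toNat := by
    rw [hxs, PySem.List.length_pyRange_one]
  apply zipFoldEq pi (fun x => PySem.List.pyGetD prev (a - x) 0) xs rev
  · omega
  · intro i h1 h2
    have hxi : xs[i] = mi + (i : Int) :=
      PySem.List.getElem_pyRange_one mi (min Mi a + 1) i (by exact h1)
    have hil : (i : Int) ≤ min Mi a - mi := by
      have : i < (min Mi a + 1 - mi).toNat := by omega
      omega
    show rev[i] = PySem.List.pyGetD prev (a - xs[i]) 0
    rw [hxi]
    have hnn : 0 ≤ a - (mi + (i : Int)) := by omega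
    have hlt2 : a - (mi + (i : Int)) < (prev.length : Int) := by omega
    rw [PySem.List.pyGetD_eq_getElem prev 0 hnn hlt2]
    have hr2 : rev[i] = (prev.take ((a - mi).toNat + 1))[(prev.take ((a - mi).toNat + 1)).length - 1 - i]'(by
        rw [List.length_take]; omega) := by
      exact List.getElem_reverse _
    rw [hr2, List.getElem_take]
    apply getElem_congr rfl
    rw [List.length_take]
    omega

-- proof-side names for the loop bodies (definitionally equal to the ports' lambdas)
def stepAF (pi mi Mi : Int)
    (st : List Int × List Int × List Int × List Int × List Int) (a : Int) :
    List Int × List Int × List Int × List Int × List Int :=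
  (st.1.tail,
   (if 0 ≤ a - mi then st.2.1.tail else st.2.1),
   (if 0 ≤ a - mi then st.2.1.headD 0 :: st.2.2.1 else st.2.2.1),
   (subastaInnerA pi (st.1.headD 0) (PySem.List.pyRange mi (min Mi a + 1) 1)
      (if 0 ≤ a - mi then st.2.1.headD 0 :: st.2.2.1 else st.2.2.1)).1 :: st.2.2.2.1,
   (subastaInnerA pi (st.1.headD 0) (PySem.List.pyRange mi (min Mi a + 1) 1)
      (if 0 ≤ a - mi then st.2.1.headD 0 :: st.2.2.1 else st.2.2.1)).2 :: st.2.2.2.2)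

theorem rowA_eq_fold (A pi mi Mi : Int) (prev : List Int) :
    subastaRowA A pi mi Mi prev =
      (((PySem.List.pyRange 0 (A + 1) 1).foldl (stepAF pi mi Mi) (prev, prev, [], [], [])).2.2.2.1.reverse,
       ((PySem.List.pyRange 0 (A + 1) 1).foldl (stepAF pi mi Mi) (prev, prev, [], [], [])).2.2.2.2.reverse) := rfl

def rowAstate (pi mi Mi : Int) (prev : List Int) (t : Nat) :
    List Int × List Int × List Int × List Int × List Int :=
  (PySem.List.pyRange 0 (t : Int) 1).foldl (stepAF pi mi Mi) (prev, prev, [], [], [])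

theorem rowA_loop (A pi mi Mi : Int) (prev : List Int)
    (h0 : 0 ≤ mi) (hlen : (prev.length : Int) = A + 1) :
    ∀ t : Nat, (t : Int) ≤ A + 1 →
      (rowAstate pi mi Mi prev t).1 = prev.drop t
      ∧ (rowAstate pi mi Mi prev t).2.1 = prev.drop ((t : Int) - mi).toNat
      ∧ (rowAstate pi mi Mi prev t).2.2.1 = (prev.take ((t : Int) - mi).toNat).reverse
      ∧ (rowAstate pi mi Mi prev t).2.2.2.1
          = ((PySem.List.pyRange 0 (t : Int) 1).map (fun a => (innerSpec pi mi Mi prev a).1)).reverse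
      ∧ (rowAstate pi mi Mi prev t).2.2.2.2
          = ((PySem.List.pyRange 0 (t : Int) 1).map (fun a => (innerSpec pi mi Mi prev a).2)).reverse := by
  intro t
  induction t with
  | zero =>
    intro _
    unfold rowAstate
    simp only [Nat.cast_zero]
    rw [PySem.List.pyRange_one_eq_nil (le_refl 0)]
    simp only [List.foldl_nil, List.map_nil, List.reverse_nil]
    have hz' : ((0 : Int) - mi).toNat = 0 := by omega
    refine ⟨by simp, by rw [hz']; simp, by rw [hz']; simp, trivial, trivial⟩
  | succ t ih =>
    intro ht1
    have hcast : ((t + 1 : Nat) : Int) = (t : Int) + 1 := by push_cast; ring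
    rw [hcast] at ht1
    unfold rowAstate at *
    rw [hcast, PySem.List.pyRange_one_succ_right (by exact_mod_cast Nat.zero_le t),
        List.foldl_append, List.foldl_cons, List.foldl_nil]
    obtain ⟨ih1, ih2, ih3, ih4, ih5⟩ := ih (by omega)
    set st := (PySem.List.pyRange 0 (t : Int) 1).foldl (stepAF pi mi Mi) (prev, prev, [], [], []) with hstdef
    set a : Int := (t : Int) with hadef
    have hA0 : (0 : Int) ≤ a := by rw [hadef]; exact_mod_cast Nat.zero_le t
    have haltlen : a < (prev.length : Int) := by omega
    have hatn : a.toNat = t := by omega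
    have hpa : st.1.headD 0 = PySem.List.pyGetD prev a 0 := by
      rw [ih1, ← hatn, pvHeadD_drop prev a hA0]
    have htail : st.1.tail = prev.drop (t + 1) := by
      rw [ih1, List.tail_drop]
    by_cases hpos : 0 ≤ a - mi
    · have hn : (a - mi).toNat < prev.length := by omega
      have hsucc : ((a + 1) - mi).toNat = (a - mi).toNat + 1 := by omega
      have hrev' : st.2.1.headD 0 :: st.2.2.1 = (prev.take ((a - mi).toNat + 1)).reverse := by
        rw [ih2, ih3, pvHeadD_drop_getElem prev _ hn, pvTake_succ_reverse prev _ hn]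
      have hhi' : st.2.1.tail = prev.drop ((a - mi).toNat + 1) := by
        rw [ih2, List.tail_drop]
      have hds : subastaInnerA pi (st.1.headD 0) (PySem.List.pyRange mi (min Mi a + 1) 1)
            (st.2.1.headD 0 :: st.2.2.1) = innerSpec pi mi Mi prev a := by
        rw [hpa, hrev']
        exact innerA_port_eq pi mi Mi prev a h0 hpos haltlen
      unfold stepAF
      simp only [if_pos hpos]
      rw [hds]
      refine ⟨htail, by rw [hhi', hsucc], by rw [hrev', hsucc], ?_, ?_⟩
      · rw [List.map_append, List.reverse_append, ih4]; rfl
      · rw [List.map_append, List.reverse_append, ih5]; rfl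
    · have hz : ((a + 1) - mi).toNat = 0 ∧ (a - mi).toNat = 0 := by omega
      have hxs : PySem.List.pyRange mi (min Mi a + 1) 1 = [] :=
        PySem.List.pyRange_one_eq_nil (by omega)
      have hds : subastaInnerA pi (st.1.headD 0) (PySem.List.pyRange mi (min Mi a + 1) 1)
            st.2.2.1 = innerSpec pi mi Mi prev a := by
        unfold subastaInnerA innerSpec
        rw [hxs, hpa]
        rfl
      unfold stepAF
      simp only [if_neg hpos]
      rw [hds]
      refine ⟨htail, by rw [ih2, hz.1, hz.2], by rw [ih3, hz.1, hz.2], ?_, ?_⟩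
      · rw [List.map_append, List.reverse_append, ih4]; rfl
      · rw [List.map_append, List.reverse_append, ih5]; rfl

theorem rowA_eq_maps (A pi mi Mi : Int) (prev : List Int)
    (hA : 0 ≤ A) (h0 : 0 ≤ mi) (hlen : prev.length = (A + 1).toNat) :
    subastaRowA A pi mi Mi prev =
      ((PySem.List.pyRange 0 (A + 1) 1).map (fun a => (innerSpec pi mi Mi prev a).1),
       (PySem.List.pyRange 0 (A + 1) 1).map (fun a => (innerSpec pi mi Mi prev a).2)) := by
  rw [rowA_eq_fold]
  have hl := rowA_loop A pi mi Mi prev h0 (by omega) (A + 1).toNat (by omega)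
  unfold rowAstate at hl
  rw [show (((A + 1).toNat : Nat) : Int) = A + 1 by omega] at hl
  obtain ⟨-, -, -, h4, h5⟩ := hl
  rw [h4, h5]
  simp

-- for an infeasible bid (Mi < mi) A's inner loop is empty for every a
theorem rowA_loop_empty (pi mi Mi : Int) (prev : List Int) (hMi : Mi < mi) (t : Nat) :
    (rowAstate pi mi Mi prev t).1 = prev.drop t
    ∧ (rowAstate pi mi Mi prev t).2.2.2.1
        = ((PySem.List.pyRange 0 (t : Int) 1).map (fun a => PySem.List.pyGetD prev a 0)).reverse
    ∧ (rowAstate pi mi Mi prev t).2.2.2.2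
        = ((PySem.List.pyRange 0 (t : Int) 1).map (fun _ => (0 : Int))).reverse := by
  induction t with
  | zero =>
    unfold rowAstate
    simp only [Nat.cast_zero]
    rw [PySem.List.pyRange_one_eq_nil (le_refl 0)]
    simp only [List.foldl_nil, List.map_nil, List.reverse_nil]
    exact ⟨by simp, trivial, trivial⟩
  | succ t ih =>
    have hcast : ((t + 1 : Nat) : Int) = (t : Int) + 1 := by push_cast; ring
    unfold rowAstate at *
    rw [hcast, PySem.List.pyRange_one_succ_right (by exact_mod_cast Nat.zero_le t),
        List.foldl_append, List.foldl_cons, List.foldl_nil]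
    obtain ⟨ih1, ih2, ih3⟩ := ih
    set st := (PySem.List.pyRange 0 (t : Int) 1).foldl (stepAF pi mi Mi) (prev, prev, [], [], []) with hstdef
    set a : Int := (t : Int) with hadef
    have hA0 : (0 : Int) ≤ a := by rw [hadef]; exact_mod_cast Nat.zero_le t
    have hatn : a.toNat = t := by omega
    have hpa : st.1.headD 0 = PySem.List.pyGetD prev a 0 := by
      rw [ih1, ← hatn, pvHeadD_drop prev a hA0]
    have hxs : PySem.List.pyRange mi (min Mi a + 1) 1 = [] :=
      PySem.List.pyRange_one_eq_nil (by omega)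
    have hds : ∀ rev : List Int,
        subastaInnerA pi (st.1.headD 0) (PySem.List.pyRange mi (min Mi a + 1) 1) rev
          = (PySem.List.pyGetD prev a 0, 0) := by
      intro rev
      unfold subastaInnerA
      rw [hxs, hpa]
      rfl
    unfold stepAF
    rw [hds]
    refine ⟨by rw [ih1, List.tail_drop], ?_, ?_⟩
    · rw [List.map_append, List.reverse_append, ih2]; rfl
    · rw [List.map_append, List.reverse_append, ih3]; rfl

-- proof-side names for the loop body of subastaRowB (definitionally equal)
def stepBFcore (pi pa : Int) (aT hiR cur arow : List Int) (a : Int)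
    (q2 : List (Int × Int)) :
    List (Int × Int) × List Int × List Int × List Int × List Int :=
  match q2.head? with
  | some p =>
    if pa < a * pi + p.2 then
      (q2, aT, hiR, (a * pi + p.2) :: cur, (a - p.1) :: arow)
    else (q2, aT, hiR, pa :: cur, (0 : Int) :: arow)
  | none => (q2, aT, hiR, pa :: cur, (0 : Int) :: arow)

def stepBF (pi mi Mi : Int)
    (st : List (Int × Int) × List Int × List Int × List Int × List Int) (a : Int) :
    List (Int × Int) × List Int × List Int × List Int × List Int :=
  stepBFcore pi (st.2.1.headD 0) (st.2.1.tail)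
    (if 0 ≤ a - mi then st.2.2.1.tail else st.2.2.1)
    st.2.2.2.1 st.2.2.2.2 a
    ((if 0 ≤ a - mi then
        popBackB (st.2.2.1.headD 0 - (a - mi) * pi) st.1 ++
          [(a - mi, st.2.2.1.headD 0 - (a - mi) * pi)]
      else st.1).dropWhile (fun p => decide (p.1 < a - Mi)))

theorem rowB_eq_fold (A pi mi Mi : Int) (prev : List Int) :
    subastaRowB A pi mi Mi prev =
      (((PySem.List.pyRange 0 (A + 1) 1).foldl (stepBF pi mi Mi) ([], prev, prev, [], [])).2.2.2.1.reverse,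
       ((PySem.List.pyRange 0 (A + 1) 1).foldl (stepBF pi mi Mi) ([], prev, prev, [], [])).2.2.2.2.reverse) := rfl

def rowBstate (pi mi Mi : Int) (prev : List Int) (t : Nat) :
    List (Int × Int) × List Int × List Int × List Int × List Int :=
  (PySem.List.pyRange 0 (t : Int) 1).foldl (stepBF pi mi Mi) ([], prev, prev, [], [])

theorem rowB_loop (A pi mi Mi : Int) (prev : List Int)
    (h0 : 0 ≤ mi) (hM : mi ≤ Mi) (hlen : (prev.length : Int) = A + 1) :
    ∀ t : Nat, (t : Int) ≤ A + 1 →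
      InvL pi mi Mi prev ((t : Int) - 1) (rowBstate pi mi Mi prev t).1
      ∧ (rowBstate pi mi Mi prev t).2.1 = prev.drop t
      ∧ (rowBstate pi mi Mi prev t).2.2.1 = prev.drop ((t : Int) - mi).toNat
      ∧ (rowBstate pi mi Mi prev t).2.2.2.1
          = ((PySem.List.pyRange 0 (t : Int) 1).map (fun a => (innerSpec pi mi Mi prev a).1)).reverse
      ∧ (rowBstate pi mi Mi prev t).2.2.2.2
          = ((PySem.List.pyRange 0 (t : Int) 1).map (fun a => (innerSpec pi mi Mi prev a).2)).reverse := by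
  intro t
  induction t with
  | zero =>
    intro _
    unfold rowBstate
    simp only [Nat.cast_zero]
    rw [PySem.List.pyRange_one_eq_nil (le_refl 0)]
    simp only [List.foldl_nil, List.map_nil, List.reverse_nil]
    have hz' : ((0 : Int) - mi).toNat = 0 := by omega
    refine ⟨?_, by simp, by rw [hz']; simp, trivial, trivial⟩
    unfold InvL
    refine ⟨?_, ?_, ?_⟩
    · intro p hp
      simp at hp
    · simp
    · intro j h1 h2 h3
      omega
  | succ t ih =>
    intro ht1
    have hcast : ((t + 1 : Nat) : Int) = (t : Int) + 1 := by push_cast; ring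
    rw [hcast] at ht1
    unfold rowBstate at *
    rw [hcast, PySem.List.pyRange_one_succ_right (by exact_mod_cast Nat.zero_le t),
        List.foldl_append, List.foldl_cons, List.foldl_nil]
    obtain ⟨ih1, ih2, ih3, ih4, ih5⟩ := ih (by omega)
    set st := (PySem.List.pyRange 0 (t : Int) 1).foldl (stepBF pi mi Mi) ([], prev, prev, [], []) with hstdef
    set a : Int := (t : Int) with hadef
    have hA0 : (0 : Int) ≤ a := by rw [hadef]; exact_mod_cast Nat.zero_le t
    have haltlen : a < (prev.length : Int) := by omega
    have hatn : a.toNat = t := by omega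
    have hpa : st.2.1.headD 0 = PySem.List.pyGetD prev a 0 := by
      rw [ih2, ← hatn, pvHeadD_drop prev a hA0]
    have htail : st.2.1.tail = prev.drop (t + 1) := by
      rw [ih2, List.tail_drop]
    have hq2 : (if 0 ≤ a - mi then
          popBackB (st.2.2.1.headD 0 - (a - mi) * pi) st.1 ++
            [(a - mi, st.2.2.1.headD 0 - (a - mi) * pi)]
        else st.1).dropWhile (fun p => decide (p.1 < a - Mi))
        = stepL pi mi Mi prev st.1 a := by
      unfold stepL
      by_cases hpos : 0 ≤ a - mi
      · have hk : st.2.2.1.headD 0 - (a - mi) * pi = qKey pi prev (a - mi) := by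
          unfold qKey
          rw [ih3, pvHeadD_drop prev (a - mi) hpos]
        rw [if_pos hpos, if_pos hpos, hk]
      · rw [if_neg hpos, if_neg hpos]
    have hhi' : (if 0 ≤ a - mi then st.2.2.1.tail else st.2.2.1)
        = prev.drop ((a + 1) - mi).toNat := by
      by_cases hpos : 0 ≤ a - mi
      · rw [if_pos hpos, ih3, List.tail_drop]
        congr 1
        omega
      · rw [if_neg hpos, ih3]
        congr 1
        omega
    have hInvNew : InvL pi mi Mi prev a (stepL pi mi Mi prev st.1 a) :=
      InvL_step pi mi Mi prev a st.1 h0 hM ih1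
    have hinner := innerSpec_eq pi mi Mi prev a (stepL pi mi Mi prev st.1 a) h0 hM hA0 hInvNew
    have hstep : stepBF pi mi Mi st a =
        (stepL pi mi Mi prev st.1 a, st.2.1.tail, prev.drop ((a + 1) - mi).toNat,
          (innerSpec pi mi Mi prev a).1 :: st.2.2.2.1,
          (innerSpec pi mi Mi prev a).2 :: st.2.2.2.2) := by
      unfold stepBF
      rw [hq2, hhi', hpa]
      unfold stepBFcore
      cases hcase : (stepL pi mi Mi prev st.1 a).head? with
      | none => simp only [hinner, hcase]
      | some p =>
        simp only [hinner, hcase]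
        by_cases hif : PySem.List.pyGetD prev a 0 < a * pi + p.2
        · simp only [if_pos hif]
        · simp only [if_neg hif]
    rw [hstep]
    refine ⟨?_, htail, rfl, ?_, ?_⟩
    · rw [show a + 1 - 1 = a by ring]
      exact hInvNew
    · rw [List.map_append, List.reverse_append, ih4]; rfl
    · rw [List.map_append, List.reverse_append, ih5]; rfl

theorem subasta_row_eq (A pi mi Mi : Int) (prev : List Int)
    (hA : 0 ≤ A) (h0 : 0 ≤ mi) (hM : mi ≤ Mi) (hlen : prev.length = (A + 1).toNat) :
    subastaRowB A pi mi Mi prev = subastaRowA A pi mi Mi prev := by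
  rw [rowB_eq_fold, rowA_eq_maps A pi mi Mi prev hA h0 hlen]
  have hl := rowB_loop A pi mi Mi prev h0 hM (by omega) (A + 1).toNat (by omega)
  unfold rowBstate at hl
  rw [show (((A + 1).toNat : Nat) : Int) = A + 1 by omega] at hl
  obtain ⟨-, -, -, h4, h5⟩ := hl
  rw [h4, h5]
  simp

theorem subasta_rowA_empty (A pi mi Mi : Int) (prev : List Int)
    (hA : 0 ≤ A) (hMi : Mi < mi) (hlen : prev.length = (A + 1).toNat) :
    subastaRowA A pi mi Mi prev = (prev, List.replicate (A + 1).toNat 0) := by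
  rw [rowA_eq_fold]
  have hl := rowA_loop_empty pi mi Mi prev hMi (A + 1).toNat
  unfold rowAstate at hl
  rw [show (((A + 1).toNat : Nat) : Int) = A + 1 by omega] at hl
  obtain ⟨-, h2, h3⟩ := hl
  rw [h2, h3]
  simp only [List.reverse_reverse]
  have h1 : (PySem.List.pyRange 0 (A + 1) 1).map (fun a => PySem.List.pyGetD prev a 0) = prev := by
    rw [show A + 1 = (prev.length : Int) by omega]
    exact PySem.List.map_pyGetD_pyRange_zero' prev 0
  have hrep : (PySem.List.pyRange 0 (A + 1) 1).map (fun _ => (0 : Int))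
      = List.replicate (A + 1).toNat 0 := by
    rw [List.eq_replicate_iff]
    constructor
    · rw [List.length_map, PySem.List.length_pyRange_one]
      omega
    · intro b hb
      simp at hb
      omega
  rw [h1, hrep]

theorem subasta_rowA_len (A pi mi Mi : Int) (prev : List Int)
    (hA : 0 ≤ A) (h0 : 0 ≤ mi) (hlen : prev.length = (A + 1).toNat) :
    (subastaRowA A pi mi Mi prev).1.length = (A + 1).toNat := by
  rw [rowA_eq_maps A pi mi Mi prev hA h0 hlen]
  simp [PySem.List.length_pyRange_one]

theorem subasta_fold_eq (A : Int) (hA : 0 ≤ A) :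
    ∀ (ofs : List (Int × Int × Int)) (prev : List Int) (rows : List (List Int)),
      prev.length = (A + 1).toNat → (∀ o ∈ ofs, 0 ≤ o.2.1 ∨ o.2.2 < o.2.1) →
      ofs.foldl (fun (st : List Int × List (List Int)) of =>
          let r := subastaRowA A of.1 of.2.1 of.2.2 st.1
          (r.1, st.2 ++ [r.2])) (prev, rows)
      = ofs.foldl (fun (st : List Int × List (List Int)) of =>
          if of.2.2 < of.2.1 then (st.1, st.2 ++ [List.replicate (A + 1).toNat 0])
          else
            let r := subastaRowB A of.1 of.2.1 of.2.2 st.1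
            (r.1, st.2 ++ [r.2])) (prev, rows) := by
  intro ofs
  induction ofs with
  | nil => intro prev rows _ _; rfl
  | cons o os ih =>
    intro prev rows hlen hpre
    simp only [List.foldl_cons]
    by_cases hcase : o.2.2 < o.2.1
    · rw [if_pos hcase, subasta_rowA_empty A o.1 o.2.1 o.2.2 prev hA hcase hlen]
      exact ih prev (rows ++ [List.replicate (A + 1).toNat 0]) hlen
        (fun p hp => hpre p (by simp [hp]))
    · have h0 : 0 ≤ o.2.1 := by rcases hpre o (by simp) with h | h <;> omega
      rw [if_neg hcase, subasta_row_eq A o.1 o.2.1 o.2.2 prev hA h0 (by omega) hlen]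
      exact ih _ _ (by rw [subasta_rowA_len A o.1 o.2.1 o.2.2 prev hA h0 hlen])
        (fun p hp => hpre p (by simp [hp]))

-- ===== VERDICT (by name: the statement is the Claim_ definition above) =====
theorem subasta_spec : Claim_equal_subasta := by
  intro A B ofertas hDom hPre
  obtain ⟨hA, hofs⟩ := hPre
  unfold Spec_subasta subasta subasta_alt
  rw [subasta_fold_eq A hA ofertas (List.replicate (A + 1).toNat 0) []
      (by simp) hofs]
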